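-- pv_equiv track=rewrite | github.com/kh277/BOJ | 백준/Gold/6176. River Crossing/River Crossing.py | solve
-- ===== SOURCE A (Python) =====
-- INF = 10**9
--
-- def solve(N, M, cost):
--     # DP[i] = 지금까지 옮긴 소가 i마리일 때, 걸린 최소 시간
--     DP = [INF for _ in range(N+1)]
--     DP[0] = 0
--
--     for moveCount in range(N):
--         for curCow in range(min(1, moveCount+1), N+1):
--             if moveCount+curCow <= N:
--                 # moveCount마리의 소를 이미 옮겼고, 이번에 John이 curCow마리의 소를 옮기고 돌아올 때 걸리는 시간
--                 DP[moveCount+curCow] = min(DP[moveCount+curCow], DP[moveCount]+cost[curCow]+M)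
--
--     # 마지막에 John이 돌아온 시간 제거
--     return DP[N]-M
-- ===== SOURCE B (Python) =====
-- INF = 10**9
--
-- def solve(N, M, cost):
--     # Saturating split DP: a plan for i cows is either one i-cow trip or the
--     # concatenation of plans for j and i-j cows; the table saturates at INF
--     # exactly like A's INF-initialized table.
--     dp = [0]
--     for i in range(1, N + 1):
--         best = cost[i] + M
--         for j in range(1, i):
--             best = min(best, dp[j] + dp[i - j])
--         dp.append(min(INF, best))
--     return dp[N] - M
-- ===== Notes on version B (the rewrite author's own statement) =====
-- stated objective: alternative
-- what changed: Replaced A's last-trip push DP over (cows-moved, group-size) transitions dp[i+g]=min(dp[i+g],dp[i]+cost[g]+M) by a saturating min-plus split recurrence dp[i]=min(INF, cost[i]+M, min_j dp[j]+dp[i-j]) that combines two previously computed plans instead of appending one trip (the inner loop is a plain min over sums, no bound guard and no per-step cost/M lookups); agreement with A, including the INF saturation, is proved via a closed characterization of A's table.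
import Mathlib
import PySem

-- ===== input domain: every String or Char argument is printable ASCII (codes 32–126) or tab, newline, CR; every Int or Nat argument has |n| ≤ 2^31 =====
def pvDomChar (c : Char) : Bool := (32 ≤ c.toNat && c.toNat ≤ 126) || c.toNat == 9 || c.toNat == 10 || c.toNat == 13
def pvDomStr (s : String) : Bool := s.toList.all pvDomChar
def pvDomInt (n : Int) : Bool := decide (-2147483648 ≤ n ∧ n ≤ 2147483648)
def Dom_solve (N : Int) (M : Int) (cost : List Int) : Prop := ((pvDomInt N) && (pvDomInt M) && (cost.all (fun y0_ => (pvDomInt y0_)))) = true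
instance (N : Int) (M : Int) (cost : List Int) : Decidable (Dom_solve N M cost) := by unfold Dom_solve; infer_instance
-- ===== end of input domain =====

-- B replaces A's last-trip push DP (relaxing dp[i+g] from dp[i]+cost[g]+M) by a
-- saturating min-plus split recurrence dp[i] = min(INF, cost[i]+M, min_j dp[j]+dp[i-j]);
-- agreement with A (including the INF saturation) is proved via a characterization
-- of A's table (alternative algorithm, same O(N^2) cost).


def INFv : Int := 10 ^ 9

-- ===== PORT A =====
def solve (N : Int) (M : Int) (cost : List Int) : Int :=
  let DP0 := (PySem.List.pyRange 0 (N + 1) 1).map (fun _ => INFv)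
  let DP1 := PySem.List.pySetD DP0 0 0
  let DPf := (PySem.List.pyRange 0 N 1).foldl (fun DP mc =>
    (PySem.List.pyRange (min 1 (mc + 1)) (N + 1) 1).foldl (fun D cc =>
      if mc + cc ≤ N then
        PySem.List.pySetD D (mc + cc)
          (min (PySem.List.pyGetD D (mc + cc) 0)
               (PySem.List.pyGetD D mc 0 + PySem.List.pyGetD cost cc 0 + M))
      else D) DP) DP1
  PySem.List.pyGetD DPf N 0 - M

-- ===== PORT B =====
def solve_alt (N : Int) (M : Int) (cost : List Int) : Int :=
  let dp := (PySem.List.pyRange 1 (N + 1) 1).foldl (fun dp i =>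
    dp ++ [min INFv ((PySem.List.pyRange 1 i 1).foldl
        (fun best j => min best (PySem.List.pyGetD dp j 0 + PySem.List.pyGetD dp (i - j) 0))
        (PySem.List.pyGetD cost i 0 + M))]) [0]
  PySem.List.pyGetD dp N 0 - M

-- ===== PRECONDITION & SPEC =====
-- Pre_solve is exactly where the Python A returns: N < 0 makes DP[0] = 0 an
-- IndexError, and for N ≥ 1 the first outer pass reads cost[1..N].
def Pre_solve (N : Int) (M : Int) (cost : List Int) : Prop :=
  0 ≤ N ∧ (1 ≤ N → N < (cost.length : Int))
instance (N : Int) (M : Int) (cost : List Int) : Decidable (Pre_solve N M cost) := by unfold Pre_solve; infer_instance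

def pvWitness_solve : Int × Int × List Int := (2, 3, [0, 5, 7])

def Spec_solve (N : Int) (M : Int) (cost : List Int) (out : Int) : Prop := out = solve_alt N M cost
instance (N : Int) (M : Int) (cost : List Int) (out : Int) : Decidable (Spec_solve N M cost out) := by unfold Spec_solve; infer_instance

-- ===== CLAIM (what is proved, stated in full; the proofs are below) =====
def Claim_equal_solve : Prop := ∀ (N : Int) (M : Int) (cost : List Int), Dom_solve N M cost → Pre_solve N M cost → Spec_solve N M cost (solve N M cost)

-- ===== LEMMAS AND PROOFS =====

-- Per-trip cost, Nat-indexed.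
def cM (M : Int) (cost : List Int) (g : Nat) : Int := cost.getD g 0 + M

-- A's table as a recurrence: dIter rebuilds A's final DP values cell by cell.
def dstep (M : Int) (cost : List Int) (dp : List Int) : List Int :=
  dp ++ [(List.range dp.length).foldl
      (fun acc k => min acc (dp.getD (dp.length - 1 - k) 0 + cost.getD (k + 1) 0 + M)) INFv]

def dIter (M : Int) (cost : List Int) : Nat → List Int
  | 0 => [0]
  | t + 1 => dstep M cost (dIter M cost t)

def Dv (M : Int) (cost : List Int) (j : Nat) : Int := (dIter M cost j).getD j 0

-- A's partially relaxed cell: sources 0..t-1 have been pushed into cell j.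
def pmin (M : Int) (cost : List Int) (t j : Nat) : Int :=
  (List.range t).foldl (fun acc k => min acc (Dv M cost k + cost.getD (j - k) 0 + M)) INFv

-- A's inner/outer loops, in Nat form.
def stepNat (M : Int) (cost : List Int) (n t : Nat) (D : List Int) (k : Nat) : List Int :=
  if t + k + 1 ≤ n then
    D.set (t + k + 1) (min (D.getD (t + k + 1) 0) (D.getD t 0 + cost.getD (k + 1) 0 + M))
  else D

def innerNat (M : Int) (cost : List Int) (n t : Nat) (D : List Int) : List Int :=
  (List.range n).foldl (stepNat M cost n t) D

def outerNat (M : Int) (cost : List Int) (n : Nat) (t : Nat) (D : List Int) : List Int :=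
  (List.range t).foldl (fun D t' => innerNat M cost n t' D) D

lemma foldl_congr_mem' {α β : Type} (l : List β) (f g : α → β → α) (a : α)
    (h : ∀ acc x, x ∈ l → f acc x = g acc x) : l.foldl f a = l.foldl g a := by
  induction l generalizing a with
  | nil => rfl
  | cons x t ih =>
    simp only [List.foldl_cons]
    rw [h a x (by simp)]
    exact ih _ (fun acc y hy => h acc y (by simp [hy]))

lemma length_dIter (M : Int) (cost : List Int) (t : Nat) :
    (dIter M cost t).length = t + 1 := by
  induction t with
  | zero => rfl
  | succ t ih => simp [dIter, dstep, ih]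

lemma getD_dIter (M : Int) (cost : List Int) {j t : Nat} (h : j ≤ t) :
    (dIter M cost t).getD j 0 = Dv M cost j := by
  induction t with
  | zero => interval_cases j; rfl
  | succ t ih =>
    rcases Nat.lt_or_ge j (t + 1) with hj | hj
    · rw [← ih (by omega)]
      show (dstep M cost (dIter M cost t)).getD j 0 = _
      unfold dstep
      rw [List.getD_append _ _ _ _ (by rw [length_dIter]; omega)]
    · have : j = t + 1 := by omega
      subst this; rfl

lemma Dv_zero (M : Int) (cost : List Int) : Dv M cost 0 = 0 := rfl

lemma Dv_succ (M : Int) (cost : List Int) (t : Nat) :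
    Dv M cost (t + 1) = (List.range (t + 1)).foldl
      (fun acc k => min acc (Dv M cost (t - k) + cost.getD (k + 1) 0 + M)) INFv := by
  show (dstep M cost (dIter M cost t)).getD (t + 1) 0 = _
  unfold dstep
  rw [List.getD_append_right _ _ _ _ (by rw [length_dIter])]
  rw [length_dIter, Nat.sub_self, List.getD_cons_zero]
  apply foldl_congr_mem'
  intro acc k hk
  rw [List.mem_range] at hk
  rw [show t + 1 - 1 - k = t - k by omega, getD_dIter M cost (show t - k ≤ t by omega)]

lemma foldl_min_absorb (l : List Int) (a x : Int) :
    l.foldl min (min a x) = min (l.foldl min a) x := by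
  induction l generalizing a with
  | nil => rfl
  | cons y t ih =>
    simp only [List.foldl_cons]
    rw [show min (min a x) y = min (min a y) x by
      rw [min_assoc, min_comm x y, ← min_assoc]]
    exact ih _

lemma foldl_min_reverse (l : List Int) (a : Int) :
    l.reverse.foldl min a = l.foldl min a := by
  induction l generalizing a with
  | nil => rfl
  | cons x t ih =>
    simp only [List.reverse_cons, List.foldl_append, List.foldl_cons, List.foldl_nil]
    rw [ih, ← foldl_min_absorb]

lemma map_range_rev {α : Type} (t : Nat) (f : Nat → α) :
    ((List.range t).map f).reverse = (List.range t).map (fun k => f (t - 1 - k)) := by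
  induction t generalizing f with
  | zero => rfl
  | succ t ih =>
    conv_lhs => rw [List.range_succ]
    conv_rhs => rw [List.range_succ_eq_map]
    simp only [List.map_append, List.map_cons, List.map_nil, List.reverse_append,
      List.reverse_cons, List.reverse_nil, List.nil_append, List.singleton_append,
      List.map_map]
    rw [ih f]
    congr 1
    apply List.map_congr_left
    intro k _
    simp only [Function.comp_apply]
    congr 1
    omega

lemma foldl_min_rev (f : Nat → Int) (a : Int) (t : Nat) :
    (List.range t).foldl (fun acc k => min acc (f k)) a
      = (List.range t).foldl (fun acc k => min acc (f (t - 1 - k))) a := by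
  have h1 : (List.range t).foldl (fun acc k => min acc (f k)) a
      = ((List.range t).map f).foldl min a := List.foldl_map.symm
  have h2 : (List.range t).foldl (fun acc k => min acc (f (t - 1 - k))) a
      = ((List.range t).map (fun k => f (t - 1 - k))).foldl min a := List.foldl_map.symm
  rw [h1, h2, ← map_range_rev, foldl_min_reverse]

lemma Dv_eq_pmin (M : Int) (cost : List Int) (t : Nat) :
    Dv M cost (t + 1) = pmin M cost (t + 1) (t + 1) := by
  rw [Dv_succ]
  unfold pmin
  rw [foldl_min_rev (fun k => Dv M cost k + cost.getD (t + 1 - k) 0 + M) INFv (t + 1)]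
  apply foldl_congr_mem'
  intro acc k hk
  rw [List.mem_range] at hk
  rw [show t + 1 - 1 - k = t - k by omega, show t + 1 - (t - k) = k + 1 by omega]

lemma pmin_succ (M : Int) (cost : List Int) (t j : Nat) :
    pmin M cost (t + 1) j = min (pmin M cost t j) (Dv M cost t + cost.getD (j - t) 0 + M) := by
  unfold pmin
  rw [List.range_succ, List.foldl_append, List.foldl_cons, List.foldl_nil]

lemma length_stepNat (M : Int) (cost : List Int) (n t : Nat) (D : List Int) (k : Nat) :
    (stepNat M cost n t D k).length = D.length := by
  unfold stepNat; split <;> simp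

lemma length_foldl_stepNat (M : Int) (cost : List Int) (n t : Nat) (l : List Nat) (D : List Int) :
    (l.foldl (stepNat M cost n t) D).length = D.length := by
  induction l generalizing D with
  | nil => rfl
  | cons k l ih => rw [List.foldl_cons, ih, length_stepNat]

lemma getD_set_lt (D : List Int) (i : Nat) (v : Int) (j : Nat) (hi : i < D.length) :
    (D.set i v).getD j 0 = if j = i then v else D.getD j 0 := by
  unfold List.getD
  rw [List.getElem?_set]
  split
  · rename_i h; subst h; simp
  · rename_i h; rw [if_neg (fun hh => h hh.symm)]

lemma stepNat_pos (M : Int) (cost : List Int) (n t : Nat) (D : List Int) (k : Nat)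
    (h : t + k + 1 ≤ n) :
    stepNat M cost n t D k
      = D.set (t + k + 1) (min (D.getD (t + k + 1) 0) (D.getD t 0 + cost.getD (k + 1) 0 + M)) := by
  unfold stepNat; rw [if_pos h]

lemma stepNat_neg (M : Int) (cost : List Int) (n t : Nat) (D : List Int) (k : Nat)
    (h : ¬ t + k + 1 ≤ n) : stepNat M cost n t D k = D := by
  unfold stepNat; rw [if_neg h]

lemma inner_getD (M : Int) (cost : List Int) (n t : Nat) (D : List Int)
    (hD : D.length = n + 1) (m : Nat) : ∀ j, j ≤ n →
    ((List.range m).foldl (stepNat M cost n t) D).getD j 0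
      = if t < j ∧ j ≤ t + m then
          min (D.getD j 0) (D.getD t 0 + cost.getD (j - t) 0 + M)
        else D.getD j 0 := by
  induction m with
  | zero =>
    intro j hj
    rw [if_neg (by omega)]; rfl
  | succ m ih =>
    intro j hj
    rw [List.range_succ, List.foldl_append, List.foldl_cons, List.foldl_nil]
    by_cases hc : t + m + 1 ≤ n
    · have hDt : ((List.range m).foldl (stepNat M cost n t) D).getD t 0 = D.getD t 0 := by
        rw [ih t (by omega), if_neg (by omega)]
      have hDi : ((List.range m).foldl (stepNat M cost n t) D).getD (t + m + 1) 0
          = D.getD (t + m + 1) 0 := by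
        rw [ih (t + m + 1) (by omega), if_neg (by omega)]
      rw [stepNat_pos M cost n t _ m hc, hDt, hDi]
      rw [getD_set_lt _ _ _ _ (by rw [length_foldl_stepNat, hD]; omega)]
      by_cases hji : j = t + m + 1
      · subst hji
        rw [if_pos rfl, if_pos (by omega)]
        rw [show t + m + 1 - t = m + 1 by omega]
      · rw [if_neg hji, ih j hj]
        by_cases h1 : t < j ∧ j ≤ t + m
        · rw [if_pos h1, if_pos (by omega)]
        · rw [if_neg h1, if_neg (by omega)]
    · rw [stepNat_neg M cost n t _ m hc, ih j hj]
      by_cases h1 : t < j ∧ j ≤ t + m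
      · rw [if_pos h1, if_pos (by omega)]
      · rw [if_neg h1, if_neg (by omega)]

def initD (n : Nat) : List Int := (List.replicate (n + 1) INFv).set 0 0

lemma length_initD (n : Nat) : (initD n).length = n + 1 := by simp [initD]

lemma getD_initD (n j : Nat) (hj : j ≤ n) :
    (initD n).getD j 0 = if j = 0 then 0 else INFv := by
  unfold initD
  rw [getD_set_lt _ _ _ _ (by simp)]
  split
  · rfl
  · unfold List.getD
    rw [List.getElem?_replicate]
    rw [if_pos (by omega)]
    rfl

lemma outerNat_zero (M : Int) (cost : List Int) (n : Nat) (D : List Int) :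
    outerNat M cost n 0 D = D := rfl

lemma outerNat_succ (M : Int) (cost : List Int) (n t : Nat) (D : List Int) :
    outerNat M cost n (t + 1) D = innerNat M cost n t (outerNat M cost n t D) := by
  unfold outerNat
  rw [List.range_succ, List.foldl_append, List.foldl_cons, List.foldl_nil]

lemma length_outerNat (M : Int) (cost : List Int) (n t : Nat) :
    (outerNat M cost n t (initD n)).length = n + 1 := by
  induction t with
  | zero => exact length_initD n
  | succ t ih =>
    rw [outerNat_succ]
    unfold innerNat
    rw [length_foldl_stepNat, ih]

lemma outer_getD (M : Int) (cost : List Int) (n : Nat) (t : Nat) : t ≤ n →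
    ∀ j, j ≤ n →
    (outerNat M cost n t (initD n)).getD j 0
      = if j ≤ t then Dv M cost j else pmin M cost t j := by
  induction t with
  | zero =>
    intro ht j hj
    rw [outerNat_zero, getD_initD n j hj]
    by_cases hj0 : j = 0
    · subst hj0; simp [Dv_zero]
    · rw [if_neg hj0, if_neg (by omega)]
      unfold pmin
      rfl
  | succ t ih =>
    intro ht j hj
    rw [outerNat_succ]
    unfold innerNat
    rw [inner_getD M cost n t _ (length_outerNat M cost n t) n j hj]
    have hFt : (outerNat M cost n t (initD n)).getD t 0 = Dv M cost t := by
      rw [ih (by omega) t (by omega), if_pos le_rfl]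
    by_cases hc : t < j
    · rw [if_pos ⟨hc, by omega⟩]
      rw [hFt, ih (by omega) j hj, if_neg (by omega), ← pmin_succ]
      by_cases hj1 : j = t + 1
      · subst hj1
        rw [if_pos le_rfl, Dv_eq_pmin]
      · rw [if_neg (by omega)]
    · rw [if_neg (by omega), ih (by omega) j hj, if_pos (by omega), if_pos (by omega)]

-- Bridge: port A computes the Nat-form outer loop.
lemma stepInt_eq (M : Int) (cost : List Int) (n t k : Nat) (D : List Int) :
    (if (t : Int) + (1 + (k : Int)) ≤ (n : Int) then
        PySem.List.pySetD D ((t : Int) + (1 + (k : Int)))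
          (min (PySem.List.pyGetD D ((t : Int) + (1 + (k : Int))) 0)
               (PySem.List.pyGetD D (t : Int) 0 + PySem.List.pyGetD cost (1 + (k : Int)) 0 + M))
      else D) = stepNat M cost n t D k := by
  have h1 : (t : Int) + (1 + (k : Int)) = ((t + k + 1 : Nat) : Int) := by push_cast; ring
  have h2 : (1 : Int) + (k : Int) = ((k + 1 : Nat) : Int) := by push_cast; ring
  rw [h1, h2, PySem.List.pySetD_natCast, PySem.List.pyGetD_natCast,
    PySem.List.pyGetD_natCast, PySem.List.pyGetD_natCast]
  unfold stepNat
  by_cases hc : t + k + 1 ≤ n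
  · rw [if_pos (show ((t + k + 1 : Nat) : Int) ≤ (n : Int) by exact_mod_cast hc), if_pos hc]
  · rw [if_neg (show ¬ ((t + k + 1 : Nat) : Int) ≤ (n : Int) by exact_mod_cast hc), if_neg hc]

lemma innerInt_eq (M : Int) (cost : List Int) (n t : Nat) (D : List Int) (mc : Int)
    (hmc : mc = (t : Int)) :
    (PySem.List.pyRange (min 1 (mc + 1)) ((n : Int) + 1) 1).foldl (fun D cc =>
      if mc + cc ≤ (n : Int) then
        PySem.List.pySetD D (mc + cc)
          (min (PySem.List.pyGetD D (mc + cc) 0)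
               (PySem.List.pyGetD D mc 0 + PySem.List.pyGetD cost cc 0 + M))
      else D) D = innerNat M cost n t D := by
  subst hmc
  have hmin : min 1 ((t : Int) + 1) = 1 := by omega
  have ht : ((n : Int) + 1 - 1).toNat = n := by omega
  rw [hmin, PySem.List.pyRange_one, ht, List.foldl_map]
  unfold innerNat
  apply foldl_congr_mem'
  intro acc k _
  exact stepInt_eq M cost n t k acc

lemma outerInt_fold (M : Int) (cost : List Int) (n : Nat) (D : List Int) (m : Nat) :
    ((List.range m).map (fun (k : Nat) => 0 + (k : Int))).foldl (fun DP mc =>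
      (PySem.List.pyRange (min 1 (mc + 1)) ((n : Int) + 1) 1).foldl (fun D cc =>
        if mc + cc ≤ (n : Int) then
          PySem.List.pySetD D (mc + cc)
            (min (PySem.List.pyGetD D (mc + cc) 0)
                 (PySem.List.pyGetD D mc 0 + PySem.List.pyGetD cost cc 0 + M))
        else D) DP) D
      = outerNat M cost n m D := by
  induction m with
  | zero => rfl
  | succ m ih =>
    rw [List.range_succ, List.map_append, List.foldl_append, ih,
      List.map_cons, List.map_nil, List.foldl_cons, List.foldl_nil, outerNat_succ]
    exact innerInt_eq M cost n m _ _ (by ring)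

lemma solve_eq_Dv (n : Nat) (M : Int) (cost : List Int) :
    solve (n : Int) M cost = Dv M cost n - M := by
  have hmain : solve (n : Int) M cost = (outerNat M cost n n (initD n)).getD n 0 - M := by
    show PySem.List.pyGetD ((PySem.List.pyRange 0 (n : Int) 1).foldl (fun DP mc =>
      (PySem.List.pyRange (min 1 (mc + 1)) ((n : Int) + 1) 1).foldl (fun D cc =>
        if mc + cc ≤ (n : Int) then
          PySem.List.pySetD D (mc + cc)
            (min (PySem.List.pyGetD D (mc + cc) 0)
                 (PySem.List.pyGetD D mc 0 + PySem.List.pyGetD cost cc 0 + M))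
        else D) DP)
      (PySem.List.pySetD ((PySem.List.pyRange 0 ((n : Int) + 1) 1).map (fun _ => INFv)) 0 0))
      (n : Int) 0 - M = _
    have h0 : ((n : Int) + 1 - 0).toNat = n + 1 := by omega
    have h1 : ((n : Int) - 0).toNat = n := by omega
    rw [PySem.List.pyRange_one 0 ((n : Int) + 1), h0,
      PySem.List.pyRange_one 0 (n : Int), h1]
    have hD0 : ((List.range (n + 1)).map (fun (k : Nat) => 0 + (k : Int))).map (fun _ => INFv)
        = List.replicate (n + 1) INFv := by
      simp [Function.comp_def, List.map_const']
    rw [hD0]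
    have hD1 : PySem.List.pySetD (List.replicate (n + 1) INFv) 0 0 = initD n := by
      rw [PySem.List.pySetD_of_nonneg _ _ (by decide)]
      rfl
    rw [hD1, outerInt_fold]
    show PySem.List.pyGetD (outerNat M cost n n (initD n)) (n : Int) 0 - M = _
    rw [PySem.List.pyGetD_natCast]
  rw [hmain, outer_getD M cost n n le_rfl n le_rfl, if_pos le_rfl]

-- B's table: tIter rebuilds Source B's dp list, cell by cell.
def tstep (M : Int) (cost : List Int) (dp : List Int) : List Int :=
  dp ++ [min INFv ((List.range (dp.length - 1)).foldl
      (fun best k => min best (dp.getD (k + 1) 0 + dp.getD (dp.length - (k + 1)) 0))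
      (cost.getD dp.length 0 + M))]

def tIter (M : Int) (cost : List Int) : Nat → List Int
  | 0 => [0]
  | t + 1 => tstep M cost (tIter M cost t)

def Tv (M : Int) (cost : List Int) (j : Nat) : Int := (tIter M cost j).getD j 0

lemma length_tIter (M : Int) (cost : List Int) (t : Nat) :
    (tIter M cost t).length = t + 1 := by
  induction t with
  | zero => rfl
  | succ t ih => simp [tIter, tstep, ih]

lemma getD_tIter (M : Int) (cost : List Int) {j t : Nat} (h : j ≤ t) :
    (tIter M cost t).getD j 0 = Tv M cost j := by
  induction t with
  | zero => interval_cases j; rfl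
  | succ t ih =>
    rcases Nat.lt_or_ge j (t + 1) with hj | hj
    · rw [← ih (by omega)]
      show (tstep M cost (tIter M cost t)).getD j 0 = _
      unfold tstep
      rw [List.getD_append _ _ _ _ (by rw [length_tIter]; omega)]
    · have : j = t + 1 := by omega
      subst this; rfl

lemma Tv_succ (M : Int) (cost : List Int) (t : Nat) :
    Tv M cost (t + 1) = min INFv ((List.range t).foldl
      (fun best k => min best (Tv M cost (k + 1) + Tv M cost (t - k)))
      (cost.getD (t + 1) 0 + M)) := by
  show (tstep M cost (tIter M cost t)).getD (t + 1) 0 = _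
  unfold tstep
  rw [List.getD_append_right _ _ _ _ (by rw [length_tIter])]
  rw [length_tIter, Nat.sub_self, List.getD_cons_zero, Nat.add_sub_cancel]
  congr 1
  apply foldl_congr_mem'
  intro acc k hk
  rw [List.mem_range] at hk
  rw [getD_tIter M cost (show k + 1 ≤ t by omega),
    show t + 1 - (k + 1) = t - k by omega, getD_tIter M cost (show t - k ≤ t by omega)]

-- Bridge: port B computes tIter.
lemma alt_step_eq (M : Int) (cost : List Int) (m : Nat) (i : Int) (hi : i = 1 + (m : Int)) :
    tIter M cost m ++
      [min INFv ((PySem.List.pyRange 1 i 1).foldl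
          (fun best j => min best (PySem.List.pyGetD (tIter M cost m) j 0
            + PySem.List.pyGetD (tIter M cost m) (i - j) 0))
          (PySem.List.pyGetD cost i 0 + M))]
      = tIter M cost (m + 1) := by
  subst hi
  have ht : ((1 + (m : Int)) - 1).toNat = m := by omega
  rw [PySem.List.pyRange_one, ht, List.foldl_map]
  show _ = tstep M cost (tIter M cost m)
  unfold tstep
  rw [length_tIter, Nat.add_sub_cancel]
  have hcost : (1 : Int) + (m : Int) = ((m + 1 : Nat) : Int) := by push_cast; ring
  rw [hcost, PySem.List.pyGetD_natCast]
  refine congrArg (fun z => tIter M cost m ++ [min INFv z]) ?_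
  apply foldl_congr_mem'
  intro acc k hk
  rw [List.mem_range] at hk
  have h1 : (1 : Int) + (k : Int) = ((k + 1 : Nat) : Int) := by push_cast; ring
  have h2 : ((m + 1 : Nat) : Int) - (1 + (k : Int)) = ((m + 1 - (k + 1) : Nat) : Int) := by
    push_cast; omega
  rw [h2, h1, PySem.List.pyGetD_natCast, PySem.List.pyGetD_natCast]

lemma alt_fold (M : Int) (cost : List Int) (m : Nat) :
    ((List.range m).map (fun (k : Nat) => 1 + (k : Int))).foldl (fun dp i =>
      dp ++ [min INFv ((PySem.List.pyRange 1 i 1).foldl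
          (fun best j => min best (PySem.List.pyGetD dp j 0 + PySem.List.pyGetD dp (i - j) 0))
          (PySem.List.pyGetD cost i 0 + M))]) [0]
      = tIter M cost m := by
  induction m with
  | zero => rfl
  | succ m ih =>
    rw [List.range_succ, List.map_append, List.foldl_append, ih,
      List.map_cons, List.map_nil, List.foldl_cons, List.foldl_nil]
    exact alt_step_eq M cost m _ rfl

lemma solve_alt_eq_Tv (n : Nat) (M : Int) (cost : List Int) :
    solve_alt (n : Int) M cost = Tv M cost n - M := by
  unfold solve_alt
  have ht : ((n : Int) + 1 - 1).toNat = n := by omega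
  rw [PySem.List.pyRange_one, ht, alt_fold]
  show PySem.List.pyGetD (tIter M cost n) (n : Int) 0 - M = _
  rw [PySem.List.pyGetD_natCast, getD_tIter M cost (le_refl n)]

-- ==== the mathematical core: both recurrences equal E i = min (S i) (INF + prefix-min S) ====

-- fmin f b n = min of b and f 0 .. f (n-1).
def fmin (f : Nat → Int) (b : Int) (n : Nat) : Int :=
  (List.range n).foldl (fun a k => min a (f k)) b

lemma fmin_succ (f : Nat → Int) (b : Int) (n : Nat) :
    fmin f b (n + 1) = min (fmin f b n) (f n) := by
  unfold fmin
  rw [List.range_succ, List.foldl_append, List.foldl_cons, List.foldl_nil]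

lemma fmin_le_base (f : Nat → Int) (b : Int) (n : Nat) : fmin f b n ≤ b := by
  induction n with
  | zero => exact le_refl b
  | succ n ih => rw [fmin_succ]; exact le_trans (min_le_left _ _) ih

lemma fmin_le (f : Nat → Int) (b : Int) {n k : Nat} (h : k < n) : fmin f b n ≤ f k := by
  induction n with
  | zero => omega
  | succ n ih =>
    rw [fmin_succ]
    rcases Nat.lt_or_ge k n with hk | hk
    · exact le_trans (min_le_left _ _) (ih hk)
    · have : k = n := by omega
      subst this; exact min_le_right _ _

lemma le_fmin (f : Nat → Int) (b : Int) (n : Nat) {x : Int}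
    (hb : x ≤ b) (hf : ∀ k, k < n → x ≤ f k) : x ≤ fmin f b n := by
  induction n with
  | zero => exact hb
  | succ n ih =>
    rw [fmin_succ]
    exact le_min (ih (fun k hk => hf k (by omega))) (hf n (by omega))

lemma fmin_cases (f : Nat → Int) (b : Int) (n : Nat) :
    fmin f b n = b ∨ ∃ k, k < n ∧ fmin f b n = f k := by
  induction n with
  | zero => exact Or.inl rfl
  | succ n ih =>
    rw [fmin_succ]
    rcases min_cases (fmin f b n) (f n) with ⟨h, _⟩ | ⟨h, _⟩
    · rw [h]
      rcases ih with h' | ⟨k, hk, h'⟩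
      · exact Or.inl h'
      · exact Or.inr ⟨k, by omega, h'⟩
    · exact Or.inr ⟨n, by omega, h⟩

-- True (unsaturated) optimum S: sIter builds it; Sv (t+1) = min over the last trip size.
def sstep (M : Int) (cost : List Int) (dp : List Int) : List Int :=
  dp ++ [(List.range (dp.length - 1)).foldl
      (fun a k => min a (dp.getD (dp.length - 1 - k) 0 + cM M cost (k + 1)))
      (cM M cost dp.length)]

def sIter (M : Int) (cost : List Int) : Nat → List Int
  | 0 => [0]
  | t + 1 => sstep M cost (sIter M cost t)

def Sv (M : Int) (cost : List Int) (j : Nat) : Int := (sIter M cost j).getD j 0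

lemma length_sIter (M : Int) (cost : List Int) (t : Nat) :
    (sIter M cost t).length = t + 1 := by
  induction t with
  | zero => rfl
  | succ t ih => simp [sIter, sstep, ih]

lemma getD_sIter (M : Int) (cost : List Int) {j t : Nat} (h : j ≤ t) :
    (sIter M cost t).getD j 0 = Sv M cost j := by
  induction t with
  | zero => interval_cases j; rfl
  | succ t ih =>
    rcases Nat.lt_or_ge j (t + 1) with hj | hj
    · rw [← ih (by omega)]
      show (sstep M cost (sIter M cost t)).getD j 0 = _
      unfold sstep
      rw [List.getD_append _ _ _ _ (by rw [length_sIter]; omega)]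
    · have : j = t + 1 := by omega
      subst this; rfl

lemma Sv_zero (M : Int) (cost : List Int) : Sv M cost 0 = 0 := rfl

lemma Sv_succ (M : Int) (cost : List Int) (t : Nat) :
    Sv M cost (t + 1) = fmin (fun k => Sv M cost (t - k) + cM M cost (k + 1))
      (cM M cost (t + 1)) t := by
  show (sstep M cost (sIter M cost t)).getD (t + 1) 0 = _
  unfold sstep
  rw [List.getD_append_right _ _ _ _ (by rw [length_sIter])]
  rw [length_sIter, Nat.sub_self, List.getD_cons_zero, Nat.add_sub_cancel]
  unfold fmin
  apply foldl_congr_mem'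
  intro acc k hk
  rw [List.mem_range] at hk
  rw [getD_sIter M cost (show t - k ≤ t by omega)]

-- Dv as an fmin (A's saturated recurrence, pulled).
lemma Dv_succ_fmin (M : Int) (cost : List Int) (t : Nat) :
    Dv M cost (t + 1) = fmin (fun k => Dv M cost (t - k) + cM M cost (k + 1)) INFv (t + 1) := by
  rw [Dv_succ]
  unfold fmin
  apply foldl_congr_mem'
  intro acc k _
  rw [show Dv M cost (t - k) + cost.getD (k + 1) 0 + M
      = Dv M cost (t - k) + cM M cost (k + 1) by unfold cM; ring]

-- Tv as an fmin (B's saturated split recurrence).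
lemma Tv_succ_fmin (M : Int) (cost : List Int) (t : Nat) :
    Tv M cost (t + 1)
      = min INFv (fmin (fun k => Tv M cost (k + 1) + Tv M cost (t - k))
          (cM M cost (t + 1)) t) := by
  rw [Tv_succ]; rfl

-- One-trip bound and decomposition of S.
lemma S_le (M : Int) (cost : List Int) {t g : Nat} (h1 : 1 ≤ g) (h2 : g ≤ t + 1) :
    Sv M cost (t + 1) ≤ Sv M cost (t + 1 - g) + cM M cost g := by
  rw [Sv_succ]
  rcases Nat.lt_or_ge (g - 1) t with hg | hg
  · have := fmin_le (fun k => Sv M cost (t - k) + cM M cost (k + 1)) (cM M cost (t + 1)) hg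
    simpa [show t - (g - 1) = t + 1 - g by omega, show g - 1 + 1 = g by omega] using this
  · have hgt : g = t + 1 := by omega
    subst hgt
    have := fmin_le_base (fun k => Sv M cost (t - k) + cM M cost (k + 1)) (cM M cost (t + 1)) t
    simpa [Sv_zero] using this

lemma S_exists (M : Int) (cost : List Int) (t : Nat) :
    ∃ g, 1 ≤ g ∧ g ≤ t + 1 ∧ Sv M cost (t + 1) = Sv M cost (t + 1 - g) + cM M cost g := by
  rw [Sv_succ]
  rcases fmin_cases (fun k => Sv M cost (t - k) + cM M cost (k + 1)) (cM M cost (t + 1)) t with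
    h | ⟨k, hk, h⟩
  · exact ⟨t + 1, by omega, by omega, by simpa [Sv_zero] using h⟩
  · exact ⟨k + 1, by omega, by omega, by simpa [show t + 1 - (k + 1) = t - k by omega] using h⟩

lemma S_le_c (M : Int) (cost : List Int) {g : Nat} (h : 1 ≤ g) :
    Sv M cost g ≤ cM M cost g := by
  obtain ⟨s, rfl⟩ : ∃ s, g = s + 1 := ⟨g - 1, by omega⟩
  have := S_le M cost (t := s) (g := s + 1) (by omega) (by omega)
  simpa [Sv_zero] using this

lemma S_subadd (M : Int) (cost : List Int) :
    ∀ a, 1 ≤ a → ∀ b, 1 ≤ b → Sv M cost (a + b) ≤ Sv M cost a + Sv M cost b := by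
  intro a
  induction a using Nat.strong_induction_on with
  | _ a ih =>
    intro ha b hb
    obtain ⟨t, rfl⟩ : ∃ t, a = t + 1 := ⟨a - 1, by omega⟩
    obtain ⟨g, hg1, hg2, hg3⟩ := S_exists M cost t
    obtain ⟨s, hs⟩ : ∃ s, t + 1 + b = s + 1 := ⟨t + b, by omega⟩
    have hstep : Sv M cost (t + 1 + b) ≤ Sv M cost (t + 1 + b - g) + cM M cost g := by
      rw [hs]
      have := S_le M cost (t := s) hg1 (show g ≤ s + 1 by omega)
      simpa [← hs] using this
    rcases Nat.eq_or_lt_of_le hg2 with hge | hglt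
    · -- g = t + 1 : S (t+1) = cM g
      have h0 : t + 1 - g = 0 := by omega
      rw [h0, Sv_zero] at hg3
      have hb' : t + 1 + b - g = b := by omega
      rw [hb'] at hstep
      omega
    · -- g ≤ t : use IH on t + 1 - g ≥ 1
      have h1g : 1 ≤ t + 1 - g := by omega
      have hsplit : t + 1 + b - g = (t + 1 - g) + b := by omega
      rw [hsplit] at hstep
      have hIH := ih (t + 1 - g) (by omega) h1g b hb
      omega

-- Prefix minimum of S (mp i = min of S 0 .. S (i-1); mp 0 = 0 = S 0).
def mp (M : Int) (cost : List Int) : Nat → Int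
  | 0 => 0
  | i + 1 => min (mp M cost i) (Sv M cost i)

lemma mp_nonpos (M : Int) (cost : List Int) (i : Nat) : mp M cost i ≤ 0 := by
  induction i with
  | zero => exact le_refl 0
  | succ i ih => exact le_trans (min_le_left _ _) ih

lemma mp_le_S (M : Int) (cost : List Int) : ∀ i m, m < i → mp M cost i ≤ Sv M cost m := by
  intro i
  induction i with
  | zero => omega
  | succ i ih =>
    intro m hm
    show min (mp M cost i) (Sv M cost i) ≤ _
    rcases Nat.lt_or_ge m i with h | h
    · exact le_trans (min_le_left _ _) (ih m h)
    · have : m = i := by omega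
      subst this; exact min_le_right _ _

lemma mp_exists (M : Int) (cost : List Int) : ∀ i, 1 ≤ i → ∃ m, m < i ∧ mp M cost i = Sv M cost m := by
  intro i
  induction i with
  | zero => omega
  | succ i ih =>
    intro _
    rcases Nat.eq_zero_or_pos i with h0 | hpos
    · subst h0
      exact ⟨0, by omega, by simp [mp, Sv_zero]⟩
    · show ∃ m, m < i + 1 ∧ min (mp M cost i) (Sv M cost i) = Sv M cost m
      rcases min_cases (mp M cost i) (Sv M cost i) with ⟨h, _⟩ | ⟨h, _⟩
      · obtain ⟨m, hm, hv⟩ := ih hpos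
        exact ⟨m, by omega, by rw [h, hv]⟩
      · exact ⟨i, by omega, h⟩

-- The closed characterization of both tables.
def Ev (M : Int) (cost : List Int) (i : Nat) : Int :=
  min (Sv M cost i) (INFv + mp M cost i)

lemma Ev_le_S (M : Int) (cost : List Int) (i : Nat) : Ev M cost i ≤ Sv M cost i :=
  min_le_left _ _

lemma Ev_le_INF (M : Int) (cost : List Int) (i : Nat) : Ev M cost i ≤ INFv := by
  have h1 : Ev M cost i ≤ INFv + mp M cost i := min_le_right _ _
  have h2 := mp_nonpos M cost i
  omega

lemma INFv_nonneg : (0 : Int) ≤ INFv := by unfold INFv; norm_num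

-- A's table equals the characterization.
lemma Dv_eq_Ev (M : Int) (cost : List Int) : ∀ i, 1 ≤ i → Dv M cost i = Ev M cost i := by
  intro i
  induction i using Nat.strong_induction_on with
  | _ i ih =>
    intro hi
    obtain ⟨t, rfl⟩ : ∃ t, i = t + 1 := ⟨i - 1, by omega⟩
    rw [Dv_succ_fmin]
    -- Dv (t+1) ≤ INFv + Sv m for every m ≤ t
    have hbound : ∀ m, m ≤ t →
        fmin (fun k => Dv M cost (t - k) + cM M cost (k + 1)) INFv (t + 1) ≤ INFv + Sv M cost m := by
      intro m hm
      rcases Nat.eq_zero_or_pos m with h0 | hpos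
      · subst h0
        have := fmin_le_base (fun k => Dv M cost (t - k) + cM M cost (k + 1)) INFv (t + 1)
        rw [Sv_zero]; omega
      · obtain ⟨s, rfl⟩ : ∃ s, m = s + 1 := ⟨m - 1, by omega⟩
        obtain ⟨g, hg1, hg2, hg3⟩ := S_exists M cost s
        have hterm := fmin_le (fun k => Dv M cost (t - k) + cM M cost (k + 1)) INFv
          (show g - 1 < t + 1 by omega)
        simp only [] at hterm
        have hkk : g - 1 + 1 = g := by omega
        rw [hkk] at hterm
        have hidx : t - (g - 1) = t + 1 - g := by omega
        rw [hidx] at hterm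
        have h1g : 1 ≤ t + 1 - g := by omega
        have hD := ih (t + 1 - g) (by omega) h1g
        have hmp : mp M cost (t + 1 - g) ≤ Sv M cost (s + 1 - g) := mp_le_S M cost _ _ (by omega)
        have hE2 : Ev M cost (t + 1 - g) ≤ INFv + mp M cost (t + 1 - g) := min_le_right _ _
        omega
    apply le_antisymm
    · apply le_min
      · -- ≤ Sv (t+1)
        obtain ⟨g, hg1, hg2, hg3⟩ := S_exists M cost t
        have hterm := fmin_le (fun k => Dv M cost (t - k) + cM M cost (k + 1)) INFv
          (show g - 1 < t + 1 by omega)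
        simp only [] at hterm
        have hkk : g - 1 + 1 = g := by omega
        rw [hkk] at hterm
        have hidx : t - (g - 1) = t + 1 - g := by omega
        rw [hidx] at hterm
        rcases Nat.eq_zero_or_pos (t + 1 - g) with h0 | hpos
        · rw [h0, Sv_zero] at hg3
          rw [h0, Dv_zero] at hterm
          omega
        · have hD := ih (t + 1 - g) (by omega) hpos
          have := Ev_le_S M cost (t + 1 - g)
          omega
      · -- ≤ INFv + mp (t+1)
        obtain ⟨m, hm, hv⟩ := mp_exists M cost (t + 1) (by omega)
        rw [hv]
        exact hbound m (by omega)
    · -- Ev (t+1) ≤ every candidate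
      apply le_fmin
      · exact Ev_le_INF M cost (t + 1)
      · intro k hk
        rcases Nat.eq_or_lt_of_le (Nat.le_of_lt_succ hk) with hkt | hkt
        · -- k = t : term = Dv 0 + cM (t+1) = cM (t+1) ≥ Sv (t+1)
          subst hkt
          rw [Nat.sub_self, Dv_zero]
          have h1 := S_le_c M cost (show 1 ≤ k + 1 by omega)
          have h2 := Ev_le_S M cost (k + 1)
          omega
        · -- k < t : j := t - k ≥ 1
          have hj1 : 1 ≤ t - k := by omega
          have hD := ih (t - k) (by omega) hj1
          rw [hD]
          have hA : Ev M cost (t + 1) ≤ Sv M cost (t - k) + cM M cost (k + 1) := by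
            have hs := S_le M cost (show 1 ≤ k + 1 by omega) (show k + 1 ≤ t + 1 by omega)
            rw [show t + 1 - (k + 1) = t - k by omega] at hs
            have := Ev_le_S M cost (t + 1)
            omega
          have hB : Ev M cost (t + 1) ≤ (INFv + mp M cost (t - k)) + cM M cost (k + 1) := by
            obtain ⟨a, ha, hav⟩ := mp_exists M cost (t - k) hj1
            rw [hav]
            have hcg := S_le_c M cost (show 1 ≤ k + 1 by omega)
            have hEmp : Ev M cost (t + 1) ≤ INFv + mp M cost (t + 1) := min_le_right _ _
            rcases Nat.eq_zero_or_pos a with h0 | hpos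
            · subst h0
              rw [Sv_zero]
              have := mp_le_S M cost (t + 1) (k + 1) (by omega)
              omega
            · have hsub := S_subadd M cost a hpos (k + 1) (by omega)
              have := mp_le_S M cost (t + 1) (a + (k + 1)) (by omega)
              omega
          have hmin : Ev M cost (t - k) = min (Sv M cost (t - k)) (INFv + mp M cost (t - k)) := rfl
          rw [hmin]
          rcases min_cases (Sv M cost (t - k)) (INFv + mp M cost (t - k)) with ⟨hc, _⟩ | ⟨hc, _⟩ <;>
            rw [hc] <;> omega

-- B's table equals the characterization.
lemma Tv_eq_Ev (M : Int) (cost : List Int) : ∀ i, 1 ≤ i → Tv M cost i = Ev M cost i := by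
  intro i
  induction i using Nat.strong_induction_on with
  | _ i ih =>
    intro hi
    obtain ⟨t, rfl⟩ : ∃ t, i = t + 1 := ⟨i - 1, by omega⟩
    rw [Tv_succ_fmin]
    apply le_antisymm
    · apply le_min
      · -- ≤ Sv (t+1)
        obtain ⟨g, hg1, hg2, hg3⟩ := S_exists M cost t
        rcases Nat.eq_or_lt_of_le hg2 with hge | hglt
        · -- g = t + 1 : base candidate cM (t+1)
          subst hge
          rw [show t + 1 - (t + 1) = 0 from by omega, Sv_zero] at hg3
          have hbase := fmin_le_base
            (fun k => Tv M cost (k + 1) + Tv M cost (t - k)) (cM M cost (t + 1)) t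
          have := min_le_right INFv (fmin (fun k => Tv M cost (k + 1) + Tv M cost (t - k))
            (cM M cost (t + 1)) t)
          omega
        · -- g ≤ t : split at j = t + 1 - g
          have hterm := fmin_le (fun k => Tv M cost (k + 1) + Tv M cost (t - k))
            (b := cM M cost (t + 1)) (show t - g < t by omega)
          simp only [] at hterm
          rw [show t - g + 1 = t + 1 - g by omega, show t - (t - g) = g by omega] at hterm
          have hTj := ih (t + 1 - g) (by omega) (by omega)
          have hTg := ih g (by omega) hg1
          have h1 := Ev_le_S M cost (t + 1 - g)
          have h2 := Ev_le_S M cost g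
          have h3 := S_le_c M cost hg1
          have := min_le_right INFv (fmin (fun k => Tv M cost (k + 1) + Tv M cost (t - k))
            (cM M cost (t + 1)) t)
          omega
      · -- ≤ INFv + mp (t+1)
        obtain ⟨m, hm, hv⟩ := mp_exists M cost (t + 1) (by omega)
        rw [hv]
        rcases Nat.eq_zero_or_pos m with h0 | hpos
        · subst h0
          rw [Sv_zero]
          have := min_le_left INFv (fmin (fun k => Tv M cost (k + 1) + Tv M cost (t - k))
            (cM M cost (t + 1)) t)
          omega
        · -- split at parts m and t + 1 - m, both ≥ 1
          have hterm := fmin_le (fun k => Tv M cost (k + 1) + Tv M cost (t - k))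
            (b := cM M cost (t + 1)) (show m - 1 < t by omega)
          simp only [] at hterm
          rw [show m - 1 + 1 = m by omega, show t - (m - 1) = t + 1 - m by omega] at hterm
          have hTm := ih m (by omega) hpos
          have hTr := ih (t + 1 - m) (by omega) (by omega)
          have h1 := Ev_le_S M cost m
          have h2 : Ev M cost (t + 1 - m) ≤ INFv + mp M cost (t + 1 - m) := min_le_right _ _
          have h3 := mp_nonpos M cost (t + 1 - m)
          have := min_le_right INFv (fmin (fun k => Tv M cost (k + 1) + Tv M cost (t - k))
            (cM M cost (t + 1)) t)
          omega
    · -- Ev (t+1) ≤ min INFv (fmin …)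
      apply le_min
      · exact Ev_le_INF M cost (t + 1)
      apply le_fmin
      · -- base: cM (t+1) ≥ Sv (t+1) ≥ Ev (t+1)
        have h1 := S_le_c M cost (show 1 ≤ t + 1 by omega)
        have h2 := Ev_le_S M cost (t + 1)
        omega
      · intro k hk
        -- parts j = k + 1 and g = t - k, both in [1, t], j + g = t + 1
        have hTj := ih (k + 1) (by omega) (by omega)
        have hTg := ih (t - k) (by omega) (by omega)
        rw [hTj, hTg]
        have hE := Ev_le_S M cost (t + 1)
        have hEmp : Ev M cost (t + 1) ≤ INFv + mp M cost (t + 1) := min_le_right _ _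
        -- four lower bounds on the possible values of Ev j + Ev g
        have hSS : Ev M cost (t + 1) ≤ Sv M cost (k + 1) + Sv M cost (t - k) := by
          have := S_subadd M cost (k + 1) (by omega) (t - k) (by omega)
          rw [show k + 1 + (t - k) = t + 1 by omega] at this
          omega
        have hSI : Ev M cost (t + 1) ≤ Sv M cost (k + 1) + (INFv + mp M cost (t - k)) := by
          obtain ⟨b, hb, hbv⟩ := mp_exists M cost (t - k) (by omega)
          rw [hbv]
          rcases Nat.eq_zero_or_pos b with h0 | hpos
          · subst h0
            rw [Sv_zero]
            have := mp_le_S M cost (t + 1) (k + 1) (by omega)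
            omega
          · have hsub := S_subadd M cost (k + 1) (by omega) b hpos
            have := mp_le_S M cost (t + 1) (k + 1 + b) (by omega)
            omega
        have hIS : Ev M cost (t + 1) ≤ (INFv + mp M cost (k + 1)) + Sv M cost (t - k) := by
          obtain ⟨a, ha, hav⟩ := mp_exists M cost (k + 1) (by omega)
          rw [hav]
          rcases Nat.eq_zero_or_pos a with h0 | hpos
          · subst h0
            rw [Sv_zero]
            have := mp_le_S M cost (t + 1) (t - k) (by omega)
            omega
          · have hsub := S_subadd M cost a hpos (t - k) (by omega)
            have := mp_le_S M cost (t + 1) (a + (t - k)) (by omega)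
            omega
        have hII : Ev M cost (t + 1)
            ≤ (INFv + mp M cost (k + 1)) + (INFv + mp M cost (t - k)) := by
          obtain ⟨a, ha, hav⟩ := mp_exists M cost (k + 1) (by omega)
          obtain ⟨b, hb, hbv⟩ := mp_exists M cost (t - k) (by omega)
          rw [hav, hbv]
          have hI := INFv_nonneg
          rcases Nat.eq_zero_or_pos a with h0a | hposa
          · subst h0a
            rw [Sv_zero]
            rcases Nat.eq_zero_or_pos b with h0b | hposb
            · subst h0b
              rw [Sv_zero]
              have := mp_nonpos M cost (t + 1)
              omega
            · have := mp_le_S M cost (t + 1) b (by omega)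
              omega
          · rcases Nat.eq_zero_or_pos b with h0b | hposb
            · subst h0b
              rw [Sv_zero]
              have := mp_le_S M cost (t + 1) a (by omega)
              omega
            · have hsub := S_subadd M cost a hposa b hposb
              have := mp_le_S M cost (t + 1) (a + b) (by omega)
              omega
        unfold Ev
        rcases min_cases (Sv M cost (k + 1)) (INFv + mp M cost (k + 1)) with ⟨hc1, _⟩ | ⟨hc1, _⟩ <;>
          rcases min_cases (Sv M cost (t - k)) (INFv + mp M cost (t - k)) with ⟨hc2, _⟩ | ⟨hc2, _⟩ <;>
          unfold Ev at hSS hSI hIS hII <;> omega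

lemma Dv_eq_Tv (M : Int) (cost : List Int) (i : Nat) : Dv M cost i = Tv M cost i := by
  rcases Nat.eq_zero_or_pos i with h0 | hpos
  · subst h0; rfl
  · rw [Dv_eq_Ev M cost i hpos, Tv_eq_Ev M cost i hpos]

-- ===== VERDICT (by name: the statement is the Claim_ definition above) =====
theorem solve_spec : Claim_equal_solve := by
  intro N M cost _ hPre
  obtain ⟨hN, _⟩ := hPre
  obtain ⟨n, rfl⟩ : ∃ n : Nat, N = (n : Int) := ⟨N.toNat, (Int.toNat_of_nonneg hN).symm⟩
  show solve _ M cost = solve_alt _ M cost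
  rw [solve_eq_Dv, solve_alt_eq_Tv, Dv_eq_Tv]
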